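-- pv_equiv track=rewrite | github.com/kartikvrama/parsec | utils/utils_data.py | return_intersection_exclusion_indices
-- ===== SOURCE A (Python) =====
-- from typing import Dict, Optional, Tuple, List, Any, Union
--
-- def return_intersection_exclusion_indices(list_a: List[Any], list_b: List[Any]):
--     """Returns the indices of the bigger list which belong to intersection and
--         exclusion. This assumes that elements are not unique.
--     """
--     if len(list_a) == len(list_b):
--         bigger_list = list_a
--         smaller_list = list_b
--     else:
--         bigger_list = list_a if len(list_a) > len(list_b) else list_b
--         smaller_list = list_a if len(list_a) < len(list_b) else list_b
--
--     if len(smaller_list) == 0: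
--         return [], list(range(len(bigger_list)))
--     intersection_indices = []
--     exclusion_indices = []
--
--     for big_id, big_item in enumerate(bigger_list):
--         for small_id, small_item in enumerate(smaller_list):
--             if big_item == small_item:
--                 intersection_indices.append(big_id)
--                 del smaller_list[small_id]
--                 break
--
--     exclusion_indices = [i for i in range(len(bigger_list)) if i not in intersection_indices]
--     assert sorted(intersection_indices + exclusion_indices) == list(range(len(bigger_list))), (
--         f" intersection: {intersection_indices}, exclusion: {exclusion_indices}"
--         f", len of bigger list: {len(bigger_list)}"
--     )
--     return intersection_indices, exclusion_indices
-- ===== SOURCE B (Python) =====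
-- def return_intersection_exclusion_indices(list_a, list_b):
--     """Single-pass re-implementation: build a multiplicity table of the smaller
--     list once, then classify each index of the bigger list in one pass.
--     (Does not mutate its arguments, unlike the original, which deletes matched
--     elements from the smaller list in place; return value is identical.)"""
--     if len(list_b) > len(list_a):
--         bigger, smaller = list_b, list_a
--     else:
--         bigger, smaller = list_a, list_b
--     counts = {}
--     for x in smaller:
--         counts[x] = counts.get(x, 0) + 1
--     intersection_indices = []
--     exclusion_indices = []
--     for i, x in enumerate(bigger):
--         c = counts.get(x, 0)
--         if c != 0:
--             counts[x] = c - 1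
--             intersection_indices.append(i)
--         else:
--             exclusion_indices.append(i)
--     return intersection_indices, exclusion_indices
-- ===== Notes on version B (the rewrite author's own statement) =====
-- stated objective: faster
-- what changed: Replaces the nested scan-and-delete over the smaller list plus the membership-filter over range(n) by a multiplicity dictionary of the smaller list built once and a single pass over the bigger list that emits intersection and exclusion indices simultaneously (and B does not mutate the smaller argument list).
import Mathlib
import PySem

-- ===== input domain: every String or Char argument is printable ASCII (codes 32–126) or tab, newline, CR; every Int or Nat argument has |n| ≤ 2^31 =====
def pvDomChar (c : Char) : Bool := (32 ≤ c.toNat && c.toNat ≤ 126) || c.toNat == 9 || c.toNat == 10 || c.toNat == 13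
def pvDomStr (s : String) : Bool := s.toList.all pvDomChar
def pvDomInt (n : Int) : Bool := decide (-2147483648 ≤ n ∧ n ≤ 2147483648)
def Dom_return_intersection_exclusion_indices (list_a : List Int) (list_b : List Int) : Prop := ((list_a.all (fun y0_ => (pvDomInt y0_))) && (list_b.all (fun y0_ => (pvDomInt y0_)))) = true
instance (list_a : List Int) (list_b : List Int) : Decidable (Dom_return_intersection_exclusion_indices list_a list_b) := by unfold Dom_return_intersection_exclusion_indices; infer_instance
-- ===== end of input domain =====

-- B replaces A's nested scan-and-delete plus range-filter by a multiplicity dict of the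
-- smaller list and one pass over the bigger list (objective: faster). Equivalence is about
-- the RETURN value only: Python A deletes matched elements from the smaller argument list
-- in place, B does not mutate its arguments.

-- ===== PORT A =====
-- inner 'for small_id, small_item in enumerate(smaller_list): if big_item == small_item:
-- del smaller_list[small_id]; break' — returns the smaller list with the first matching
-- element deleted, or none when the inner loop finds no match (the index is only used
-- for the del, so the scan carries the list position directly).
def pvInnerA (item : Int) : List Int → Option (List Int)
  | [] => none
  | x :: rest => if item = x then some rest
      else (pvInnerA item rest).map (fun r => x :: r)

-- outer 'for big_id, big_item in enumerate(bigger_list): …' with state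
-- (smaller_list, intersection_indices)
def pvLoopA : List (Int × Int) → List Int → List Int → List Int × List Int
  | [], small, inter => (inter, small)
  | (i, x) :: rest, small, inter =>
    match pvInnerA x small with
    | some small' => pvLoopA rest small' (inter ++ [i])
    | none => pvLoopA rest small inter

-- the final assert always succeeds (intersection is an increasing subset of range(n) and
-- exclusion is its complement), so it is not ported.
def return_intersection_exclusion_indices (list_a : List Int) (list_b : List Int) : List Int × List Int :=
  let bigger := if list_a.length = list_b.length then list_a
                else if list_a.length > list_b.length then list_a else list_b
  let smaller := if list_a.length = list_b.length then list_b
                 else if list_a.length < list_b.length then list_a else list_b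
  if smaller.length = 0 then ([], PySem.List.pyRange 0 bigger.length 1)
  else
    let res := pvLoopA (PySem.List.enumerate bigger) smaller []
    let inter := res.1
    let excl := (PySem.List.pyRange 0 bigger.length 1).filter (fun i => !(inter.contains i))
    (inter, excl)

-- ===== PORT B =====
-- 'for i, x in enumerate(bigger): …' with state (intersection_indices, exclusion_indices, counts)
def pvLoopB : List (Int × Int) → List Int → List Int → PySem.Dict Int Int → List Int × List Int × PySem.Dict Int Int
  | [], inter, excl, d => (inter, excl, d)
  | (i, x) :: rest, inter, excl, d =>
    let c := d.getD x 0
    if c ≠ 0 then pvLoopB rest (inter ++ [i]) excl (d.insert x (c - 1))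
    else pvLoopB rest inter (excl ++ [i]) d

def return_intersection_exclusion_indices_alt (list_a : List Int) (list_b : List Int) : List Int × List Int :=
  let p := if list_b.length > list_a.length then (list_b, list_a) else (list_a, list_b)
  let bigger := p.1
  let smaller := p.2
  let counts := smaller.foldl (fun d x => d.insert x (d.getD x 0 + 1)) (PySem.Dict.empty : PySem.Dict Int Int)
  let res := pvLoopB (PySem.List.enumerate bigger) [] [] counts
  (res.1, res.2.1)

-- ===== PRECONDITION & SPEC =====
def Spec_return_intersection_exclusion_indices (list_a : List Int) (list_b : List Int) (out : List Int × List Int) : Prop := out = return_intersection_exclusion_indices_alt list_a list_b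
instance (list_a : List Int) (list_b : List Int) (out : List Int × List Int) : Decidable (Spec_return_intersection_exclusion_indices list_a list_b out) := by unfold Spec_return_intersection_exclusion_indices; infer_instance

-- ===== CLAIM (what is proved, stated in full; the proofs are below) =====
def Claim_equal_return_intersection_exclusion_indices : Prop := ∀ (list_a : List Int) (list_b : List Int), Dom_return_intersection_exclusion_indices list_a list_b → Spec_return_intersection_exclusion_indices list_a list_b (return_intersection_exclusion_indices list_a list_b)

-- ===== LEMMAS AND PROOFS =====

-- pvInnerA finds nothing exactly when the item is absent
theorem pvInnerA_eq_none {item : Int} {l : List Int} : pvInnerA item l = none ↔ item ∉ l := by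
  induction l with
  | nil => simp [pvInnerA]
  | cons x rest ih =>
    by_cases h : item = x
    · simp [pvInnerA, h]
    · simp [pvInnerA, h, Option.map_eq_none_iff, ih]

-- when it finds a match it deletes the first occurrence
theorem pvInnerA_eq_some {item : Int} {l r : List Int} (h : pvInnerA item l = some r) :
    r = l.erase item := by
  induction l generalizing r with
  | nil => simp [pvInnerA] at h
  | cons x rest ih =>
    by_cases hx : item = x
    · simp [pvInnerA, hx] at h
      simp [hx, ← h]
    · simp [pvInnerA, hx, Option.map_eq_some_iff] at h
      obtain ⟨r', hr', rfl⟩ := h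
      have : (x == item) = false := by simp [Ne.symm hx]
      simp [this, ih hr']

-- B's intersection accumulator only grows, and new entries come from the pairs' indices
theorem pvLoopB_inter_mono (pairs : List (Int × Int)) (inter excl : List Int)
    (d : PySem.Dict Int Int) :
    ∃ t, (pvLoopB pairs inter excl d).1 = inter ++ t ∧ ∀ i ∈ t, i ∈ pairs.map (·.1) := by
  induction pairs generalizing inter excl d with
  | nil => exact ⟨[], by simp [pvLoopB]⟩
  | cons p rest ih =>
    obtain ⟨i, x⟩ := p
    by_cases hc : d.getD x 0 ≠ 0
    · obtain ⟨t, ht, hmem⟩ := ih (inter ++ [i]) excl (d.insert x (d.getD x 0 - 1))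
      refine ⟨i :: t, ?_, ?_⟩
      · simp [pvLoopB, hc, ht]
      · intro j hj
        simp only [List.map_cons]
        rcases List.mem_cons.mp hj with rfl | hj
        · exact List.mem_cons_self
        · exact List.mem_cons_of_mem _ (hmem j hj)
    · obtain ⟨t, ht, hmem⟩ := ih inter (excl ++ [i]) d
      refine ⟨t, by simp [pvLoopB, hc, ht], fun j hj => by simp [hmem j hj]⟩

-- counter invariant: if d holds the multiset of `small`, both loops select the same indices
theorem pvLoopB_inter_eq (pairs : List (Int × Int)) (small inter excl : List Int)
    (d : PySem.Dict Int Int) (hinv : ∀ v, d.getD v 0 = (small.count v : Int)) :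
    (pvLoopB pairs inter excl d).1 = (pvLoopA pairs small inter).1 := by
  induction pairs generalizing small inter excl d with
  | nil => simp [pvLoopA, pvLoopB]
  | cons p rest ih =>
    obtain ⟨i, x⟩ := p
    by_cases hmem : x ∈ small
    · have hcnt : 0 < small.count x := List.count_pos_iff.mpr hmem
      have hc : d.getD x 0 ≠ 0 := by rw [hinv x]; omega
      obtain ⟨r, hr⟩ : ∃ r, pvInnerA x small = some r := by
        cases hfind : pvInnerA x small with
        | none => exact absurd (pvInnerA_eq_none.mp hfind) (by simp [hmem])
        | some r => exact ⟨r, rfl⟩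
      have hre := pvInnerA_eq_some hr
      have hinv' : ∀ v, (d.insert x (d.getD x 0 - 1)).getD v 0 = (r.count v : Int) := by
        intro v
        rw [PySem.Dict.getD_insert, hre]
        by_cases hv : v = x
        · subst hv; rw [if_pos rfl, hinv v, List.count_erase_self]; omega
        · rw [if_neg hv, hinv v, List.count_erase_of_ne hv]
      simp only [pvLoopA, pvLoopB, hr, hc, ne_eq, not_false_eq_true, if_pos]
      exact ih r (inter ++ [i]) excl _ hinv'
    · have hc : ¬ (d.getD x 0 ≠ 0) := by
        rw [hinv x, List.count_eq_zero_of_not_mem hmem]; simp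
      have hfind : pvInnerA x small = none := pvInnerA_eq_none.mpr hmem
      simp only [pvLoopA, pvLoopB, hfind, hc, if_false]
      exact ih small inter (excl ++ [i]) d hinv

-- B's exclusion list is exactly the pair indices missing from B's final intersection list
theorem pvLoopB_excl_eq (pairs : List (Int × Int)) (inter excl : List Int)
    (d : PySem.Dict Int Int)
    (hnd : (pairs.map (·.1)).Nodup)
    (hdisj : ∀ i ∈ inter, i ∉ pairs.map (·.1)) :
    (pvLoopB pairs inter excl d).2.1
      = excl ++ (pairs.map (·.1)).filter (fun i => !((pvLoopB pairs inter excl d).1.contains i)) := by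
  induction pairs generalizing inter excl d with
  | nil => simp [pvLoopB]
  | cons p rest ih =>
    obtain ⟨i, x⟩ := p
    have hnd' : (rest.map (·.1)).Nodup := (List.nodup_cons.mp hnd).2
    have hi_rest : i ∉ rest.map (·.1) := (List.nodup_cons.mp hnd).1
    by_cases hc : d.getD x 0 ≠ 0
    · -- matched: i joins the intersection, so the filter drops it
      have hstep : pvLoopB ((i, x) :: rest) inter excl d
          = pvLoopB rest (inter ++ [i]) excl (d.insert x (d.getD x 0 - 1)) := by
        simp [pvLoopB, hc]
      have hdisj' : ∀ j ∈ inter ++ [i], j ∉ rest.map (·.1) := by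
        intro j hj
        rcases List.mem_append.mp hj with hj | hj
        · exact fun hr => hdisj j hj (by simp [hr])
        · simp at hj; subst hj; exact hi_rest
      obtain ⟨t, ht, _⟩ := pvLoopB_inter_mono rest (inter ++ [i]) excl (d.insert x (d.getD x 0 - 1))
      have hicontains : ((pvLoopB ((i, x) :: rest) inter excl d).1.contains i) = true := by
        rw [hstep, ht]; simp
      rw [hstep]
      rw [ih (inter ++ [i]) excl (d.insert x (d.getD x 0 - 1)) hnd' hdisj']
      rw [← hstep]
      simp only [List.map_cons, List.filter_cons, hicontains]
      simp [hstep]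
    · -- unmatched: i joins the exclusion list and never enters the intersection
      have hstep : pvLoopB ((i, x) :: rest) inter excl d
          = pvLoopB rest inter (excl ++ [i]) d := by
        simp [pvLoopB, hc]
      have hdisj' : ∀ j ∈ inter, j ∉ rest.map (·.1) := by
        intro j hj hr; exact hdisj j hj (by simp [hr])
      obtain ⟨t, ht, hmem⟩ := pvLoopB_inter_mono rest inter (excl ++ [i]) d
      have hnc : ((pvLoopB ((i, x) :: rest) inter excl d).1.contains i) = false := by
        rw [hstep, ht]
        simp only [List.contains_eq_mem, List.mem_append, decide_eq_false_iff_not]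
        rintro (h | h)
        · exact hdisj i h (by simp)
        · exact hi_rest (hmem i h)
      rw [hstep, ih inter (excl ++ [i]) d hnd' hdisj', ← hstep]
      simp only [List.map_cons, List.filter_cons, hnc]
      simp [hstep]

-- the counts dict built by B's first loop is the multiset of `small`
theorem pvCounts_inv (small : List Int) (v : Int) :
    (small.foldl (fun d x => d.insert x (d.getD x 0 + 1)) (PySem.Dict.empty : PySem.Dict Int Int)).getD v 0
      = (small.count v : Int) := by
  rw [PySem.Dict.getD_foldl_insert_add_one]
  simp

-- with an empty smaller list nothing ever matches
theorem pvLoopA_nil_small (pairs : List (Int × Int)) (inter : List Int) :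
    pvLoopA pairs [] inter = (inter, []) := by
  induction pairs with
  | nil => simp [pvLoopA]
  | cons q qs ihq => obtain ⟨i, x⟩ := q; simpa [pvLoopA, pvInnerA] using ihq

-- core equality after the bigger/smaller selection
theorem pvCore (bigger smaller : List Int) :
    (if smaller.length = 0 then (([] : List Int), PySem.List.pyRange 0 bigger.length 1)
     else ((pvLoopA (PySem.List.enumerate bigger) smaller []).1,
           (PySem.List.pyRange 0 bigger.length 1).filter
             (fun i => !((pvLoopA (PySem.List.enumerate bigger) smaller []).1.contains i))))
    = ((pvLoopB (PySem.List.enumerate bigger) [] []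
          (smaller.foldl (fun d x => d.insert x (d.getD x 0 + 1)) (PySem.Dict.empty : PySem.Dict Int Int))).1,
       (pvLoopB (PySem.List.enumerate bigger) [] []
          (smaller.foldl (fun d x => d.insert x (d.getD x 0 + 1)) (PySem.Dict.empty : PySem.Dict Int Int))).2.1) := by
  have hmapfst : (PySem.List.enumerate bigger).map (·.1) = PySem.List.pyRange 0 bigger.length 1 := by
    rw [PySem.List.map_fst_enumerate]; norm_num
  have hnd : ((PySem.List.enumerate bigger).map (·.1)).Nodup := by
    rw [hmapfst]; exact PySem.List.nodup_pyRange_one 0 _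
  have hdisj : ∀ i ∈ ([] : List Int), i ∉ (PySem.List.enumerate bigger).map (·.1) := by simp
  have hinter := pvLoopB_inter_eq (PySem.List.enumerate bigger) smaller [] []
      (smaller.foldl (fun d x => d.insert x (d.getD x 0 + 1)) (PySem.Dict.empty : PySem.Dict Int Int))
      (pvCounts_inv smaller)
  have hexcl := pvLoopB_excl_eq (PySem.List.enumerate bigger) [] []
      (smaller.foldl (fun d x => d.insert x (d.getD x 0 + 1)) (PySem.Dict.empty : PySem.Dict Int Int))
      hnd hdisj
  by_cases hs : smaller.length = 0
  · -- empty smaller list: no index ever matches, the whole range is excluded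
    rw [if_pos hs]
    have hsmall : smaller = [] := List.length_eq_zero_iff.mp hs
    have hiA : (pvLoopA (PySem.List.enumerate bigger) smaller []).1 = [] := by
      rw [hsmall, pvLoopA_nil_small]
    have hiB := hinter.trans hiA
    refine Prod.ext hiB.symm ?_
    rw [hexcl, hiB, hmapfst]
    simp
  · rw [if_neg hs]
    refine Prod.ext hinter.symm ?_
    rw [hexcl, hinter, hmapfst]
    simp

-- ===== VERDICT (by name: the statement is the Claim_ definition above) =====
theorem return_intersection_exclusion_indices_spec : Claim_equal_return_intersection_exclusion_indices := by
  intro la lb _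
  unfold Spec_return_intersection_exclusion_indices
  unfold return_intersection_exclusion_indices return_intersection_exclusion_indices_alt
  rcases Nat.lt_trichotomy la.length lb.length with h | h | h
  · have h1 : ¬ la.length = lb.length := Nat.ne_of_lt h
    have h2 : ¬ la.length > lb.length := Nat.not_lt.mpr (Nat.le_of_lt h)
    simp only [if_neg h1, if_neg h2, if_pos h]
    exact pvCore lb la
  · have hbg : ¬ lb.length > la.length := by omega
    simp only [if_pos h, if_neg hbg]
    exact pvCore la lb
  · have h1 : ¬ la.length = lb.length := (Nat.ne_of_lt h).symm
    have h2 : ¬ la.length < lb.length := Nat.not_lt.mpr (Nat.le_of_lt h)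
    have h3 : ¬ lb.length > la.length := Nat.not_lt.mpr (Nat.le_of_lt h)
    simp only [if_neg h1, if_neg h2, if_pos (gt_iff_lt.mpr h)]
    exact pvCore la lb
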